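-- pv_equiv track=rewrite | github.com/pwysocka26-ai/jarvis-app_v2 | app/b2c/v36_brain.py | _free_windows
-- ===== SOURCE A (Python) =====
-- from typing import Any, Dict, List, Optional, Tuple
--
-- def _fmt_hhmm(minutes: int) -> str:
--     minutes = max(0, int(minutes))
--     return f"{minutes // 60:02d}:{minutes % 60:02d}"
--
-- def _free_windows(rows: List[Dict[str, Any]]) -> List[str]:
--     ordered = sorted(rows, key=lambda r: (r["start"], r["end"]))
--     if not ordered:
--         return []
--     wins = []
--     prev_end = ordered[0]["end"]
--     for row in ordered[1:]:
--         if row["start"] > prev_end: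
--             wins.append(f"{_fmt_hhmm(prev_end)}–{_fmt_hhmm(row['start'])}")
--         prev_end = max(prev_end, row["end"])
--     return wins[:5]
-- ===== SOURCE B (Python) =====
-- from typing import Any, Dict, List, Optional, Tuple
--
-- def _fmt_hhmm(minutes: int) -> str:
--     minutes = max(0, int(minutes))
--     return f"{minutes // 60:02d}:{minutes % 60:02d}"
--
-- def _free_windows(rows: List[Dict[str, Any]]) -> List[str]:
--     ordered = sorted(rows, key=lambda r: (r["start"], r["end"]))
--     # pass 1: prefix running maxima of the busy ends
--     ends = []
--     m = None
--     for r in ordered: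
--         m = r["end"] if m is None else max(m, r["end"])
--         ends.append(m)
--     # pass 2: a gap opens wherever the next start exceeds the max end so far
--     gaps = [
--         f"{_fmt_hhmm(e)}–{_fmt_hhmm(r['start'])}"
--         for e, r in zip(ends, ordered[1:])
--         if r["start"] > e
--     ]
--     return gaps[:5]
-- ===== Notes on version B (the rewrite author's own statement) =====
-- stated objective: alternative
-- what changed: B replaces A's fused single loop with scalar (wins, prev_end) state by two separate passes: first it materialises the list of prefix running maxima of the busy ends, then a comprehension over zip(ends, ordered[1:]) collects a gap wherever the next start exceeds the prefix maximum.
import Mathlib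
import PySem

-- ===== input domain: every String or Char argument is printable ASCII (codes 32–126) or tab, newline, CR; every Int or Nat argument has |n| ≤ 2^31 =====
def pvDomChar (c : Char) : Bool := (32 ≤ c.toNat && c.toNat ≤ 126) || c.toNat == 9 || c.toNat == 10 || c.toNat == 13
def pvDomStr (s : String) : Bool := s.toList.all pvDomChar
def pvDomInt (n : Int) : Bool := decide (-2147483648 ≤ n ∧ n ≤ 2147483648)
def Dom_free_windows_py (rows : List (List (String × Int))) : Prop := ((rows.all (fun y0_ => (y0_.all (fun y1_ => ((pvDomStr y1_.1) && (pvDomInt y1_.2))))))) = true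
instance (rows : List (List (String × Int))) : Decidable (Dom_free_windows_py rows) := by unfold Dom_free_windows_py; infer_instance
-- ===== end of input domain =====

-- B builds the prefix running maxima of the busy ends as an explicit list in one pass and
-- then collects the gaps from (prefix-max, next row) pairs in a second pass, instead of A's
-- single fused loop with scalar accumulator state (objective: alternative decomposition).

-- ===== PORT A =====
-- r["start"] / r["end"]: first-match lookup in the row's association list; the default 0 is
-- never reached under Pre_ (both keys present).
def pvRowGet (row : List (String × Int)) (k : String) : Int :=
  (PySem.Dict.mk row).getD k 0

-- f"{m:02d}" for m ≥ 0: pad with '0' to width 2 (hand port, exact for nonnegative values).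
def pvPad2 (s : String) : String := if s.length < 2 then "0" ++ s else s

def fmt_hhmm (minutes : Int) : String :=
  let m := max 0 minutes
  pvPad2 (PySem.Int.toStr (PySem.Int.floordiv m 60)) ++ ":" ++
    pvPad2 (PySem.Int.toStr (PySem.Int.mod m 60))

-- A's fused loop over ordered[1:], state = (wins, prev_end)
def pvLoopA (rest : List (List (String × Int))) (wins : List String) (prev : Int) : List String :=
  match rest with
  | [] => wins
  | r :: rs =>
      pvLoopA rs
        (if pvRowGet r "start" > prev then
            wins ++ [fmt_hhmm prev ++ "–" ++ fmt_hhmm (pvRowGet r "start")]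
         else wins)
        (max prev (pvRowGet r "end"))

def free_windows_py (rows : List (List (String × Int))) : List String :=
  let ordered := PySem.List.sorted2 rows (fun r => pvRowGet r "start") (fun r => pvRowGet r "end")
  match ordered with
  | [] => []
  | first :: rest =>
      -- wins[:5] on a list = take 5 (exact: nonnegative bound)
      (pvLoopA rest [] (pvRowGet first "end")).take 5

-- ===== PORT B =====
-- pass 1 of Source B: prefix running maxima of the ends ('m = r["end"] if m is None else max(m, r["end"])')
def pvPrefixMax (rows : List (List (String × Int))) (m : Option Int) : List Int :=
  match rows with
  | [] => []
  | r :: rs =>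
      let m' := match m with
        | none => pvRowGet r "end"
        | some v => max v (pvRowGet r "end")
      m' :: pvPrefixMax rs (some m')

def free_windows_py_alt (rows : List (List (String × Int))) : List String :=
  let ordered := PySem.List.sorted2 rows (fun r => pvRowGet r "start") (fun r => pvRowGet r "end")
  let ends := pvPrefixMax ordered none
  -- pass 2 of Source B: comprehension over zip(ends, ordered[1:])
  let gaps := (ends.zip ordered.tail).filterMap (fun p =>
      if pvRowGet p.2 "start" > p.1 then
        some (fmt_hhmm p.1 ++ "–" ++ fmt_hhmm (pvRowGet p.2 "start"))
      else none)
  gaps.take 5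

-- ===== PRECONDITION & SPEC =====
-- Pre_: every row carries both the "start" and the "end" key; on any other row A (and B) raise KeyError.
def Pre_free_windows_py (rows : List (List (String × Int))) : Prop :=
  (rows.all (fun row => (PySem.Dict.mk row).contains "start" && (PySem.Dict.mk row).contains "end")) = true
instance (rows : List (List (String × Int))) : Decidable (Pre_free_windows_py rows) := by unfold Pre_free_windows_py; infer_instance
def pvWitness_free_windows_py : (List (List (String × Int))) :=
  [[("start", 540), ("end", 600)], [("start", 630), ("end", 660)]]

def Spec_free_windows_py (rows : List (List (String × Int))) (out : List String) : Prop := out = free_windows_py_alt rows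
instance (rows : List (List (String × Int))) (out : List String) : Decidable (Spec_free_windows_py rows out) := by unfold Spec_free_windows_py; infer_instance

-- ===== CLAIM (what is proved, stated in full; the proofs are below) =====
def Claim_equal_free_windows_py : Prop := ∀ (rows : List (List (String × Int))), Dom_free_windows_py rows → Pre_free_windows_py rows → Spec_free_windows_py rows (free_windows_py rows)

-- ===== LEMMAS AND PROOFS =====

-- the gap collector of B's second pass
def pvGapF (p : Int × List (String × Int)) : Option String :=
  if pvRowGet p.2 "start" > p.1 then
    some (fmt_hhmm p.1 ++ "–" ++ fmt_hhmm (pvRowGet p.2 "start"))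
  else none

-- the sequence of prev_end values A's loop sees, one per remaining row
def pvAcc (rest : List (List (String × Int))) (prev : Int) : List Int :=
  match rest with
  | [] => []
  | r :: rs => prev :: pvAcc rs (max prev (pvRowGet r "end"))

theorem pvLoopA_eq (rest : List (List (String × Int))) (wins : List String) (prev : Int) :
    pvLoopA rest wins prev = wins ++ ((pvAcc rest prev).zip rest).filterMap pvGapF := by
  induction rest generalizing wins prev with
  | nil => simp [pvLoopA, pvAcc]
  | cons r rs ih =>
      simp only [pvLoopA, pvAcc, List.zip_cons_cons, List.filterMap_cons, pvGapF]
      split <;> (simp only [ih, List.append_assoc]; rfl)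

theorem pvPrefixMax_zip (rest : List (List (String × Int))) (prev : Int) :
    ((prev :: pvPrefixMax rest (some prev)).zip rest) = ((pvAcc rest prev).zip rest) := by
  induction rest generalizing prev with
  | nil => simp
  | cons r rs ih =>
      simp only [pvPrefixMax, pvAcc, List.zip_cons_cons]
      exact congrArg _ (ih (max prev (pvRowGet r "end")))

-- ===== VERDICT (by name: the statement is the Claim_ definition above) =====
theorem free_windows_py_spec : Claim_equal_free_windows_py := by
  intro rows _ _
  unfold Spec_free_windows_py free_windows_py free_windows_py_alt
  cases h : PySem.List.sorted2 rows (fun r => pvRowGet r "start") (fun r => pvRowGet r "end") with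
  | nil => simp [pvPrefixMax]
  | cons first rest =>
      simp only [List.tail_cons, pvPrefixMax]
      rw [pvLoopA_eq, pvPrefixMax_zip]
      simp [pvGapF]
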